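-- pv_equiv track=rewrite | github.com/Qs11s/algsample | validator.py | _norm_samples
-- ===== SOURCE A (Python) =====
-- from typing import Any, Dict, List, Tuple
--
-- def _norm_samples(samples: List[int]) -> List[int]:
--     if not isinstance(samples, list):
--         raise TypeError("samples")
--     if any(not isinstance(x, int) for x in samples):
--         raise TypeError("samples")
--     if len(samples) != len(set(samples)):
--         raise ValueError("samples")
--     return sorted(samples)
-- ===== SOURCE B (Python) =====
-- from typing import List
--
-- def _norm_samples(samples: List[int]) -> List[int]:
--     if not isinstance(samples, list):
--         raise TypeError("samples")
--     if any(not isinstance(x, int) for x in samples):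
--         raise TypeError("samples")
--     s = sorted(samples)
--     for i in range(1, len(s)):
--         if s[i] == s[i - 1]:
--             raise ValueError("samples")
--     return s
-- ===== Notes on version B (the rewrite author's own statement) =====
-- stated objective: alternative
-- what changed: duplicate detection via a single sort followed by an adjacent-pair scan, instead of building a hash set and comparing cardinalities; the sort is then reused as the return value
import Mathlib
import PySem

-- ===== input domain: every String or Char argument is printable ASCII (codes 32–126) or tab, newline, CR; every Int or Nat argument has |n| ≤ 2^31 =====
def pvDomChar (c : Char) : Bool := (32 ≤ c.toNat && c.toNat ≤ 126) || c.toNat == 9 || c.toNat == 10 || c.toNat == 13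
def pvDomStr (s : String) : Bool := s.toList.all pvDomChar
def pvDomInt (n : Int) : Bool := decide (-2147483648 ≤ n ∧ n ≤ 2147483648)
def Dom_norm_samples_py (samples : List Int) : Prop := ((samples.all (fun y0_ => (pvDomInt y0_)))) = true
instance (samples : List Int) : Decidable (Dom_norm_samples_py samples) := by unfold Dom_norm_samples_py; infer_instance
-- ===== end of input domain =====

-- B detects duplicates by scanning adjacent elements of the sorted list instead of comparing with a hash-set's cardinality; same O(n log n), alternative decomposition.


-- ===== PORT A =====
-- 'raise ValueError' when len(samples) != len(set(samples)); those inputs are outside Pre_, the port returns [] there.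
def norm_samples_py (samples : List Int) : List Int :=
  if samples.length ≠ (PySem.Set.ofList samples).length then []
  else PySem.List.sorted samples (fun x => x) false

-- ===== PORT B =====
-- the 'for i in range(1, len(s)): if s[i] == s[i-1]: raise' loop, as structural recursion on adjacent pairs
def pvAdjDup : List Int → Bool
  | a :: b :: t => a == b || pvAdjDup (b :: t)
  | _ => false

def norm_samples_py_alt (samples : List Int) : List Int :=
  let s := PySem.List.sorted samples (fun x => x) false
  if pvAdjDup s then [] else s

-- ===== PRECONDITION & SPEC =====
-- A raises ValueError exactly when samples has a duplicate (TypeError guards are unreachable under the List Int type).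
def Pre_norm_samples_py (samples : List Int) : Prop := samples.Nodup
instance (samples : List Int) : Decidable (Pre_norm_samples_py samples) := by unfold Pre_norm_samples_py; infer_instance
def pvWitness_norm_samples_py : List Int := [3, 1, 2]

def Spec_norm_samples_py (samples : List Int) (out : List Int) : Prop := out = norm_samples_py_alt samples
instance (samples : List Int) (out : List Int) : Decidable (Spec_norm_samples_py samples out) := by unfold Spec_norm_samples_py; infer_instance

-- ===== CLAIM (what is proved, stated in full; the proofs are below) =====
def Claim_equal_norm_samples_py : Prop := ∀ (samples : List Int), Dom_norm_samples_py samples → Pre_norm_samples_py samples → Spec_norm_samples_py samples (norm_samples_py samples)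

-- ===== LEMMAS AND PROOFS =====
lemma pvAdjDup_eq_false_of_nodup (l : List Int) (h : l.Nodup) : pvAdjDup l = false := by
  induction l with
  | nil => rfl
  | cons a t ih =>
    cases t with
    | nil => rfl
    | cons b u =>
      simp only [pvAdjDup, Bool.or_eq_false_iff]
      refine ⟨?_, ih h.of_cons⟩
      have : a ≠ b := by
        intro hab; exact (List.nodup_cons.mp h).1 (hab ▸ List.mem_cons_self)
      simpa using this

-- ===== VERDICT (by name: the statement is the Claim_ definition above) =====
theorem norm_samples_py_spec : Claim_equal_norm_samples_py := by
  intro samples _ hnd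
  unfold Spec_norm_samples_py norm_samples_py norm_samples_py_alt
  have h1 : PySem.Set.ofList samples = samples := PySem.Set.ofList_eq_self_of_nodup _ hnd
  have hs : (PySem.List.sorted samples (fun x => x) false).Nodup :=
    (PySem.List.sorted_perm samples (fun x => x) false).nodup_iff.mpr hnd
  simp [h1, pvAdjDup_eq_false_of_nodup _ hs]
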